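-- pv_equiv track=rewrite | github.com/Yoshigonnawin/subtitles_yt_api | subtitles_yt_api/youtube_client.py | select_track
-- ===== SOURCE A (Python) =====
-- FORMAT_PREFERENCE = ("vtt", "srv3", "json3", "ttml", "srv2", "srv1")
--
-- def select_track(formats: list[dict]) -> dict | None:
--     """Choose the most convenient subtitle track format for downstream parsing."""
--     for wanted_ext in FORMAT_PREFERENCE:
--         for track in formats:
--             if track.get("ext") == wanted_ext and track.get("url"):
--                 return track
--     for track in formats:
--         if track.get("url"):
--             return track
--     return None
-- ===== SOURCE B (Python) =====
-- FORMAT_PREFERENCE = ("vtt", "srv3", "json3", "ttml", "srv2", "srv1")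
--
-- def select_track(formats: list[dict]) -> dict | None:
--     """Choose the most convenient subtitle track format for downstream parsing."""
--     index = {}
--     fallback = None
--     for track in formats:
--         if track.get("url"):
--             ext = track.get("ext")
--             if ext not in index:
--                 index[ext] = track
--             if fallback is None:
--                 fallback = track
--     for wanted_ext in FORMAT_PREFERENCE:
--         if wanted_ext in index:
--             return index[wanted_ext]
--     return fallback
-- ===== Notes on version B (the rewrite author's own statement) =====
-- stated objective: simpler
-- what changed: One indexing pass builds ext->first url-bearing track (plus a first-with-url fallback), replacing the six repeated scans over formats with a fixed-size lookup over FORMAT_PREFERENCE.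
import Mathlib
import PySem

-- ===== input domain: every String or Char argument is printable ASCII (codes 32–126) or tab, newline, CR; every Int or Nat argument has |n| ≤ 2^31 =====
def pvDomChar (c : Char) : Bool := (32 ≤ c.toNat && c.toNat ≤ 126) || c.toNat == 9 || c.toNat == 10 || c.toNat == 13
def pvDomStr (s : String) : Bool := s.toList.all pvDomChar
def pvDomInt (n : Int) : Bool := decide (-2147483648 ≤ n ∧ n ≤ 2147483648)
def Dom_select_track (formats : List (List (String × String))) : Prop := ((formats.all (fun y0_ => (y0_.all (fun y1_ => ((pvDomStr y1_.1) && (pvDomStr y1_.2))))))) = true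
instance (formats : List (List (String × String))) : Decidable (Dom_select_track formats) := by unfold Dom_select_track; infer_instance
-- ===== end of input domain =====

-- B replaces A's six repeated scans over formats with one indexing pass (ext -> first url-bearing track, plus a fallback) and a fixed lookup: simpler/one-pass, same result.

-- ===== PORT A =====
def FORMAT_PREFERENCE : List String := ["vtt", "srv3", "json3", "ttml", "srv2", "srv1"]

-- track.get(k): first match in the association list (Python dict lookup)
def trackGet (t : List (String × String)) (k : String) : Option String :=
  (t.find? (fun p => p.1 == k)).map (·.2)

-- truthiness of track.get("url"): present and non-empty
def urlTruthy (t : List (String × String)) : Bool :=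
  match trackGet t "url" with
  | some s => !(s == "")
  | none => false

def select_track (formats : List (List (String × String))) : Option (List (String × String)) :=
  match FORMAT_PREFERENCE.findSome?
      (fun wanted => formats.find? (fun t => trackGet t "ext" == some wanted && urlTruthy t)) with
  | some t => some t
  | none => formats.find? urlTruthy

-- ===== PORT B =====
def selB_step (st : PySem.Dict (Option String) (List (String × String)) × Option (List (String × String)))
    (t : List (String × String)) :
    PySem.Dict (Option String) (List (String × String)) × Option (List (String × String)) :=
  if urlTruthy t then
    let idx := if (st.1.get? (trackGet t "ext")).isNone then st.1.insert (trackGet t "ext") t else st.1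
    let fb := if st.2.isNone then some t else st.2
    (idx, fb)
  else st

def select_track_alt (formats : List (List (String × String))) : Option (List (String × String)) :=
  let st := formats.foldl selB_step (PySem.Dict.empty, none)
  match FORMAT_PREFERENCE.findSome? (fun wanted => st.1.get? (some wanted)) with
  | some t => some t
  | none => st.2

-- ===== PRECONDITION & SPEC =====
def Spec_select_track (formats : List (List (String × String))) (out : Option (List (String × String))) : Prop := out = select_track_alt formats
instance (formats : List (List (String × String))) (out : Option (List (String × String))) : Decidable (Spec_select_track formats out) := by unfold Spec_select_track; infer_instance

-- ===== CLAIM (what is proved, stated in full; the proofs are below) =====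
def Claim_equal_select_track : Prop := ∀ (formats : List (List (String × String))), Dom_select_track formats → Spec_select_track formats (select_track formats)

-- ===== LEMMAS AND PROOFS =====

theorem find?_congr' {α : Type} (p q : α → Bool) (l : List α) (h : ∀ a, p a = q a) :
    l.find? p = l.find? q := by
  induction l with
  | nil => rfl
  | cons a rest ih => simp only [List.find?, h a]; cases q a <;> simp [ih]

theorem findSome?_congr' {α β : Type} (f g : α → Option β) (l : List α) (h : ∀ a, f a = g a) :
    l.findSome? f = l.findSome? g := by
  induction l with
  | nil => rfl
  | cons a rest ih => simp only [List.findSome?_cons, h a]; cases g a <;> simp [ih]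

-- invariant of B's single pass: the index extends the accumulator by first matches, the fallback by the first url-bearing track
theorem selB_fold_inv (l : List (List (String × String)))
    (d : PySem.Dict (Option String) (List (String × String))) (fb : Option (List (String × String))) :
    (∀ k, (l.foldl selB_step (d, fb)).1.get? k
        = (d.get? k).or (l.find? (fun t => urlTruthy t && trackGet t "ext" == k)))
    ∧ (l.foldl selB_step (d, fb)).2 = fb.or (l.find? urlTruthy) := by
  induction l generalizing d fb with
  | nil => simp
  | cons t rest ih =>
    by_cases hu : urlTruthy t
    · have hstep : selB_step (d, fb) t
          = (if (d.get? (trackGet t "ext")).isNone then d.insert (trackGet t "ext") t else d,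
             if fb.isNone then some t else fb) := by
        simp [selB_step, hu]
      rw [List.foldl_cons, hstep]
      obtain ⟨ih1, ih2⟩ := ih (if (d.get? (trackGet t "ext")).isNone then d.insert (trackGet t "ext") t else d)
        (if fb.isNone then some t else fb)
      constructor
      · intro k
        rw [ih1 k]
        simp only [List.find?, hu, Bool.true_and]
        by_cases hk : k = trackGet t "ext"
        · rw [hk]
          simp only [beq_self_eq_true]
          by_cases hd : (d.get? (trackGet t "ext")).isNone
          · have hd' : d.get? (trackGet t "ext") = none := Option.isNone_iff_eq_none.mp hd
            simp [hd', PySem.Dict.get?_insert_self]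
          · cases hg : d.get? (trackGet t "ext") with
            | none => simp [hg] at hd
            | some v => simp [hg]
        · have hne : (trackGet t "ext" == k) = false := by
            simp only [beq_eq_false_iff_ne, ne_eq]
            exact fun h => hk h.symm
          rw [hne]
          by_cases hd : (d.get? (trackGet t "ext")).isNone
          · simp only [hd, if_pos, PySem.Dict.get?_insert]
            rw [if_neg hk]
          · simp [hd]
      · rw [ih2]
        simp only [List.find?, hu]
        cases fb <;> simp
    · have hstep : selB_step (d, fb) t = (d, fb) := by simp [selB_step, hu]
      rw [List.foldl_cons, hstep]
      obtain ⟨ih1, ih2⟩ := ih d fb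
      refine ⟨fun k => ?_, ?_⟩
      · rw [ih1 k]
        simp [List.find?, hu]
      · rw [ih2]
        simp [List.find?, hu]

-- ===== VERDICT (by name: the statement is the Claim_ definition above) =====
theorem select_track_spec : Claim_equal_select_track := by
  intro formats _
  unfold Spec_select_track select_track select_track_alt
  obtain ⟨h1, h2⟩ := selB_fold_inv formats PySem.Dict.empty none
  have hfs : (FORMAT_PREFERENCE.findSome? (fun wanted => (formats.foldl selB_step (PySem.Dict.empty, none)).1.get? (some wanted)))
      = FORMAT_PREFERENCE.findSome? (fun wanted => formats.find? (fun t => trackGet t "ext" == some wanted && urlTruthy t)) := by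
    apply findSome?_congr'
    intro w
    rw [h1 (some w)]
    rw [find?_congr' _ (fun t => trackGet t "ext" == some w && urlTruthy t) formats (fun t => Bool.and_comm _ _)]
    simp
  simp only []
  rw [← hfs, h2]
  simp
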